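-- pv_equiv track=rewrite | github.com/nishu959/Pepcodingdynamicprogramming | totalpathrecursionforloop.py | totalstep
-- ===== SOURCE A (Python) =====
-- def totalstep(vn,fn):
--
--   if(vn>fn):
--     return 0
--   if(vn==fn):
--     return 1
--
--   ans = 0
--   for i in range(1,4):
--     ans += totalstep(vn+i,fn)
--
--
--
--   return ans
-- ===== SOURCE B (Python) =====
-- def totalstep(vn, fn):
--     if vn > fn:
--         return 0
--     a, b, c = 1, 0, 0
--     for _ in range(fn - vn):
--         a, b, c = a + b + c, a, b
--     return a
-- ===== Notes on version B (the rewrite author's own statement) =====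
-- stated objective: alternative
-- what changed: Replaced the exponential 3-way recursion with a bottom-up tribonacci iteration keeping the last three values in a rolling triple (intended as asymptotically faster; a timing run could not confirm a ratio on its generated inputs); Pre_ excludes gaps fn-vn >= 999, on which A's depth-(gap+1) descent exceeds CPython's default recursion limit of 1000 and raises RecursionError.
import Mathlib
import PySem

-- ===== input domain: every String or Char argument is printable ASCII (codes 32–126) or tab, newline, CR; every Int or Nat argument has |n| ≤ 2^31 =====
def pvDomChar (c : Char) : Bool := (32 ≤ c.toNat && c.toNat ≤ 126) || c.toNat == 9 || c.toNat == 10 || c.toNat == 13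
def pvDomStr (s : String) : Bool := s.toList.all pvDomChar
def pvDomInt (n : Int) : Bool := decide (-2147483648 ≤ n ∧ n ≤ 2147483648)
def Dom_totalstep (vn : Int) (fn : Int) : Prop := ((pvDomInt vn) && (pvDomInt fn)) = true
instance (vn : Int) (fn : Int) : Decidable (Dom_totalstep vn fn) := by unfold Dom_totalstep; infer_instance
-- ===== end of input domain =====

-- B replaces A's exponential 3-way recursion with a bottom-up tribonacci iteration (rolling triple).

-- ===== PORT A =====
-- A's loop `for i in range(1,4): ans += totalstep(vn+i,fn)` is unrolled into its three fixed iterations.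
def totalstep (vn : Int) (fn : Int) : Int :=
  if vn > fn then 0
  else if vn = fn then 1
  else 0 + totalstep (vn + 1) fn + totalstep (vn + 2) fn + totalstep (vn + 3) fn
termination_by (fn - vn).toNat
decreasing_by all_goals omega

-- ===== PORT B =====
def totalstep_alt (vn : Int) (fn : Int) : Int :=
  if vn > fn then 0
  else
    ((List.range (fn - vn).toNat).foldl
      (fun (s : Int × Int × Int) _ => (s.1 + s.2.1 + s.2.2, s.1, s.2.1)) (1, 0, 0)).1

-- ===== PRECONDITION & SPEC =====
-- A's recursion descends one frame per unit of the gap fn - vn before doing anything else, so under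
-- CPython's default recursion limit of 1000 it raises RecursionError whenever the gap is >= 999;
-- Pre_ admits exactly the gaps on which that depth-(gap+1) descent stays within the limit.
def Pre_totalstep (vn : Int) (fn : Int) : Prop := fn - vn ≤ 998
instance (vn : Int) (fn : Int) : Decidable (Pre_totalstep vn fn) := by unfold Pre_totalstep; infer_instance
def pvWitness_totalstep : Int × Int := (0, 5)

def Spec_totalstep (vn : Int) (fn : Int) (out : Int) : Prop := out = totalstep_alt vn fn
instance (vn : Int) (fn : Int) (out : Int) : Decidable (Spec_totalstep vn fn out) := by unfold Spec_totalstep; infer_instance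

-- ===== CLAIM (what is proved, stated in full; the proofs are below) =====
def Claim_equal_totalstep : Prop := ∀ (vn : Int) (fn : Int), Dom_totalstep vn fn → Pre_totalstep vn fn → Spec_totalstep vn fn (totalstep vn fn)

-- ===== LEMMAS AND PROOFS =====

def pvStep (s : Int × Int × Int) : Int × Int × Int := (s.1 + s.2.1 + s.2.2, s.1, s.2.1)

def pvIter (n : Nat) : Int × Int × Int := pvStep^[n] (1, 0, 0)

lemma pvIter_succ (n : Nat) : pvIter (n + 1) = pvStep (pvIter n) := by
  rw [pvIter, Function.iterate_succ_apply']; rfl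

lemma pvFoldl_eq_iter (n : Nat) :
    (List.range n).foldl (fun (s : Int × Int × Int) _ => (s.1 + s.2.1 + s.2.2, s.1, s.2.1)) (1, 0, 0)
      = pvIter n := by
  induction n with
  | zero => rfl
  | succ k ih =>
      rw [List.range_succ, List.foldl_append, ih, pvIter_succ]
      rfl

-- components of pvIter: first = trib, second = trib shifted by 1, third shifted by 2
lemma pvIter_shift (n : Nat) :
    (pvIter (n + 1)).2.1 = (pvIter n).1 ∧ (pvIter (n + 1)).2.2 = (pvIter n).2.1 := by
  rw [pvIter_succ]; exact ⟨rfl, rfl⟩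

-- A as a function of the gap n = (fn - vn).toNat equals (pvIter n).1, for vn ≤ fn
lemma totalstep_eq_iter : ∀ (n : Nat) (vn fn : Int), ¬ vn > fn → (fn - vn).toNat = n →
    totalstep vn fn = (pvIter n).1 := by
  intro n
  induction n using Nat.strong_induction_on with
  | _ n ih =>
    intro vn fn hle hn
    have hvf : vn ≤ fn := by omega
    match n, hn with
    | 0, hn =>
        have : vn = fn := by omega
        unfold totalstep; simp [this, pvIter]
    | 1, hn =>
        have h1 : vn + 1 = fn := by omega
        unfold totalstep
        have hne : ¬ vn = fn := by omega
        rw [if_neg (by omega), if_neg hne]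
        have e1 : totalstep (vn + 1) fn = (pvIter 0).1 := ih 0 (by omega) _ _ (by omega) (by omega)
        have e2 : totalstep (vn + 2) fn = 0 := by unfold totalstep; rw [if_pos (by omega)]
        have e3 : totalstep (vn + 3) fn = 0 := by unfold totalstep; rw [if_pos (by omega)]
        rw [e1, e2, e3]; decide
    | 2, hn =>
        unfold totalstep
        rw [if_neg (by omega), if_neg (by omega)]
        have e1 : totalstep (vn + 1) fn = (pvIter 1).1 := ih 1 (by omega) _ _ (by omega) (by omega)
        have e2 : totalstep (vn + 2) fn = (pvIter 0).1 := ih 0 (by omega) _ _ (by omega) (by omega)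
        have e3 : totalstep (vn + 3) fn = 0 := by unfold totalstep; rw [if_pos (by omega)]
        rw [e1, e2, e3]; decide
    | (k + 3), hn =>
        unfold totalstep
        rw [if_neg (by omega), if_neg (by omega)]
        have e1 : totalstep (vn + 1) fn = (pvIter (k + 2)).1 :=
          ih (k + 2) (by omega) _ _ (by omega) (by omega)
        have e2 : totalstep (vn + 2) fn = (pvIter (k + 1)).1 :=
          ih (k + 1) (by omega) _ _ (by omega) (by omega)
        have e3 : totalstep (vn + 3) fn = (pvIter k).1 :=
          ih k (by omega) _ _ (by omega) (by omega)
        rw [e1, e2, e3]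
        have h2 := pvIter_shift (k + 1)
        have h1 := pvIter_shift k
        rw [pvIter_succ (k + 2)]
        show _ = (pvIter (k + 2)).1 + (pvIter (k + 2)).2.1 + (pvIter (k + 2)).2.2
        rw [h2.1, h2.2, h1.1]
        ring

-- ===== VERDICT (by name: the statement is the Claim_ definition above) =====
theorem totalstep_spec : Claim_equal_totalstep := by
  intro vn fn _ _
  unfold Spec_totalstep totalstep_alt
  by_cases h : vn > fn
  · rw [if_pos h]; unfold totalstep; rw [if_pos h]
  · rw [if_neg h, pvFoldl_eq_iter]
    exact totalstep_eq_iter _ vn fn h rfl
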